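-- pv_equiv track=rewrite | github.com/KarolinaPSouza/dataset-pesquisa | 1666-Building_Roads/12096468.py | build_roads
-- ===== SOURCE A (Python) =====
-- from collections import deque
--
-- def bfs(start, graph, visited):
--     queue = deque([start])
--     visited[start] = True
--     while queue:
--         node = queue.popleft()
--         for neighbor in graph[node]:
--             if not visited[neighbor]:
--                 visited[neighbor] = True
--                 queue.append(neighbor)
--
-- def build_roads(n, m, roads):
--     graph = [[] for _ in range(n + 1)]
--     visited = [False] * (n + 1)
--
--     for a, b in roads:
--         graph[a].append(b)
--         graph[b].append(a)
--
--     components = []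
--     for city in range(1, n + 1):
--         if not visited[city]:
--             components.append(city)
--             bfs(city, graph, visited)
--
--     num_new_roads = len(components) - 1
--     new_roads = [(components[i], components[i+1]) for i in range(num_new_roads)]
--
--     return num_new_roads, new_roads
-- ===== SOURCE B (Python) =====
-- def _union(comp, a, b):
--     ra = comp.get(a, a)
--     rb = comp.get(b, b)
--     if ra != rb:
--         lo, hi = (ra, rb) if ra < rb else (rb, ra)
--         comp = {x: (lo if r == hi else r) for x, r in comp.items()}
--         comp[hi] = lo
--     return comp
--
-- def build_roads(n, m, roads):
--     comp = {}
--     for a, b in roads: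
--         comp = _union(comp, a, b)
--     seen = set()
--     components = []
--     for c in range(1, n + 1):
--         r = comp.get(c, c)
--         if r not in seen:
--             seen.add(r)
--             components.append(c)
--     return len(components) - 1, list(zip(components, components[1:]))
-- ===== Notes on version B (the rewrite author's own statement) =====
-- stated objective: simpler
-- what changed: Replaces adjacency-list construction plus BFS with a queue by a single fold over the edges maintaining a node-to-minimum-representative map (merge components by relabelling) and one pass over 1..n keeping the first city of each representative; pairs built with zip instead of index arithmetic.
-- outside the precondition, e.g. on build_roads(3, 1, [(-1, 1)]): A returns (1, [(1, 2)]), B returns (2, [(1, 2), (2, 3)]); on build_roads(2, 1, [(5, 1)]): A raises IndexError, B returns (1, [(1, 2)])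
import Mathlib
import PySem

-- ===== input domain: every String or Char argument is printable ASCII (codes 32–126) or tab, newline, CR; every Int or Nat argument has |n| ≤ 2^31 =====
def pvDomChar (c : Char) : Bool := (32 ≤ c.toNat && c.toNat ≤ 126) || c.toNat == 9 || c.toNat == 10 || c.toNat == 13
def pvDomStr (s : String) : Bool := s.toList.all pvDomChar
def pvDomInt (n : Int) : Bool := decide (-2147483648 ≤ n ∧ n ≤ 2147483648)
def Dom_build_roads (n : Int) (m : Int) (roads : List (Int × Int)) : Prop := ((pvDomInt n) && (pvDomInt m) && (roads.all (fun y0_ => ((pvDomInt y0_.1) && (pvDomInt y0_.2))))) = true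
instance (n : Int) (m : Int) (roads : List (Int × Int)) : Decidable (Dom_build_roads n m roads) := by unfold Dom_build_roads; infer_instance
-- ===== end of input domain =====

-- B replaces BFS component-finding by one fold over the edges keeping a node→min-representative map (simpler; return value only, no mutation involved).

-- ===== PORT A =====
-- graph[i].append(x) — python list indexing (negative wraps); out-of-range raises, excluded by Pre_
def pvAppendAt (g : List (List Int)) (i : Int) (x : Int) : List (List Int) :=
  PySem.List.pySetD g i (PySem.List.pyGetD g i [] ++ [x])

-- the 'while queue' loop of bfs; fuel is only a termination device (2*len(visited)+2 pops always suffice)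
def pvBfsLoop (graph : List (List Int)) : Nat → List Int → List Bool → List Bool
  | 0, _, visited => visited
  | _ + 1, [], visited => visited
  | fuel + 1, node :: queue, visited =>
      let s := (PySem.List.pyGetD graph node []).foldl
        (fun (s : List Bool × List Int) neighbor =>
          if PySem.List.pyGetD s.1 neighbor false = false then
            (PySem.List.pySetD s.1 neighbor true, s.2 ++ [neighbor])
          else s)
        (visited, queue)
      pvBfsLoop graph fuel s.2 s.1

def pvBfs (start : Int) (graph : List (List Int)) (visited : List Bool) : List Bool :=
  pvBfsLoop graph (2 * visited.length + 2) [start] (PySem.List.pySetD visited start true)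

def build_roads (n : Int) (m : Int) (roads : List (Int × Int)) : Int × (List (Int × Int)) :=
  let graph0 : List (List Int) := List.replicate (n + 1).toNat []
  let visited0 : List Bool := List.replicate (n + 1).toNat false
  let graph := roads.foldl (fun g p => pvAppendAt (pvAppendAt g p.1 p.2) p.2 p.1) graph0
  let s := (PySem.List.pyRange 1 (n + 1) 1).foldl
    (fun (s : List Int × List Bool) city =>
      if PySem.List.pyGetD s.2 city false = false then
        (s.1 ++ [city], pvBfs city graph s.2)
      else s)
    ([], visited0)
  let components := s.1
  let num_new_roads : Int := (components.length : Int) - 1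
  let new_roads := (PySem.List.pyRange 0 num_new_roads 1).map
    (fun i => (PySem.List.pyGetD components i 0, PySem.List.pyGetD components (i + 1) 0))
  (num_new_roads, new_roads)

-- ===== PORT B =====
def pvUnion (comp : PySem.Dict Int Int) (a b : Int) : PySem.Dict Int Int :=
  let ra := comp.getD a a
  let rb := comp.getD b b
  if ra ≠ rb then
    let lo := if ra < rb then ra else rb
    let hi := if ra < rb then rb else ra
    (PySem.Dict.mk (comp.items.map fun q => (q.1, if q.2 = hi then lo else q.2))).insert hi lo
  else comp

def build_roads_alt (n : Int) (m : Int) (roads : List (Int × Int)) : Int × (List (Int × Int)) :=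
  let comp := roads.foldl (fun c p => pvUnion c p.1 p.2) PySem.Dict.empty
  let s := (PySem.List.pyRange 1 (n + 1) 1).foldl
    (fun (s : List Int × PySem.Set Int) c =>
      if PySem.Set.contains s.2 (comp.getD c c) = true then s
      else (s.1 ++ [c], PySem.Set.add s.2 (comp.getD c c)))
    ([], PySem.Set.empty)
  let components := s.1
  ((components.length : Int) - 1, components.zip (components.drop 1))

-- ===== PRECONDITION & SPEC =====
-- Pre_ keeps road endpoints inside 0..n: above n (or below -(n+1)) A raises IndexError, and for a
-- negative endpoint -k A silently merges the cities picked by Python's negative-index wraparound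
-- (row n+1-k) — an accidental corner no caller would specify.
def Pre_build_roads (n : Int) (m : Int) (roads : List (Int × Int)) : Prop :=
  ∀ p ∈ roads, 0 ≤ p.1 ∧ p.1 ≤ n ∧ 0 ≤ p.2 ∧ p.2 ≤ n
instance (n : Int) (m : Int) (roads : List (Int × Int)) : Decidable (Pre_build_roads n m roads) := by unfold Pre_build_roads; infer_instance

def pvWitness_build_roads : Int × Int × (List (Int × Int)) := (4, 2, [(1, 2), (3, 4)])

def Spec_build_roads (n : Int) (m : Int) (roads : List (Int × Int)) (out : Int × (List (Int × Int))) : Prop := out = build_roads_alt n m roads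
instance (n : Int) (m : Int) (roads : List (Int × Int)) (out : Int × (List (Int × Int))) : Decidable (Spec_build_roads n m roads out) := by unfold Spec_build_roads; infer_instance

-- ===== CLAIM (what is proved, stated in full; the proofs are below) =====
def Claim_equal_build_roads : Prop := ∀ (n : Int) (m : Int) (roads : List (Int × Int)), Dom_build_roads n m roads → Pre_build_roads n m roads → Spec_build_roads n m roads (build_roads n m roads)

-- ===== LEMMAS AND PROOFS =====

-- connectivity relation generated by the (undirected) road list
def pvAdj (roads : List (Int × Int)) (x y : Int) : Prop := (x, y) ∈ roads ∨ (y, x) ∈ roads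

def pvConn (roads : List (Int × Int)) : Int → Int → Prop := Relation.ReflTransGen (pvAdj roads)

lemma pvAdj_symm (roads : List (Int × Int)) {x y : Int} (h : pvAdj roads x y) : pvAdj roads y x := h.symm

lemma pvConn_refl (roads : List (Int × Int)) (x : Int) : pvConn roads x x := Relation.ReflTransGen.refl

lemma pvConn_symm (roads : List (Int × Int)) {x y : Int} (h : pvConn roads x y) : pvConn roads y x :=
  Relation.ReflTransGen.symmetric (fun _ _ hh => pvAdj_symm roads hh) h

lemma pvConn_nil {x y : Int} (h : pvConn [] x y) : x = y := by
  induction h with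
  | refl => rfl
  | tail _ h2 ih => rcases h2 with h | h <;> simp at h

lemma pvConn_mono (roads : List (Int × Int)) (e : Int × Int) {x y : Int} (h : pvConn roads x y) :
    pvConn (roads ++ [e]) x y := by
  refine Relation.ReflTransGen.mono ?_ h
  intro a b hab
  rcases hab with h | h
  · exact Or.inl (by simp [h])
  · exact Or.inr (by simp [h])

lemma pvAdj_snoc_iff (roads : List (Int × Int)) (a b u v : Int) :
    pvAdj (roads ++ [(a, b)]) u v ↔ pvAdj roads u v ∨ (u = a ∧ v = b) ∨ (u = b ∧ v = a) := by
  simp [pvAdj]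
  tauto

lemma pvConn_snoc_iff (roads : List (Int × Int)) (a b x y : Int) :
    pvConn (roads ++ [(a, b)]) x y ↔
      pvConn roads x y ∨ (pvConn roads x a ∧ pvConn roads b y) ∨ (pvConn roads x b ∧ pvConn roads a y) := by
  constructor
  · intro h
    induction h with
    | refl => exact Or.inl Relation.ReflTransGen.refl
    | @tail c d h1 h2 ih =>
      rcases (pvAdj_snoc_iff roads a b c d).1 h2 with hcd | ⟨hc, hd⟩ | ⟨hc, hd⟩
      · rcases ih with h | ⟨h1, h2'⟩ | ⟨h1, h2'⟩
        · exact Or.inl (h.tail hcd)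
        · exact Or.inr (Or.inl ⟨h1, h2'.tail hcd⟩)
        · exact Or.inr (Or.inr ⟨h1, h2'.tail hcd⟩)
      · subst hc; subst hd
        rcases ih with h | ⟨h1, h2'⟩ | ⟨h1, h2'⟩
        · exact Or.inr (Or.inl ⟨h, Relation.ReflTransGen.refl⟩)
        · exact Or.inr (Or.inl ⟨h1, Relation.ReflTransGen.refl⟩)
        · exact Or.inl h1
      · subst hc; subst hd
        rcases ih with h | ⟨h1, h2'⟩ | ⟨h1, h2'⟩
        · exact Or.inr (Or.inr ⟨h, Relation.ReflTransGen.refl⟩)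
        · exact Or.inl h1
        · exact Or.inr (Or.inr ⟨h1, Relation.ReflTransGen.refl⟩)
  · intro h
    have hedge : pvConn (roads ++ [(a, b)]) a b :=
      Relation.ReflTransGen.single (Or.inl (by simp))
    rcases h with h | ⟨h1, h2⟩ | ⟨h1, h2⟩
    · exact pvConn_mono roads _ h
    · exact ((pvConn_mono roads _ h1).trans hedge).trans (pvConn_mono roads _ h2)
    · exact ((pvConn_mono roads _ h1).trans (pvConn_symm _ hedge)).trans (pvConn_mono roads _ h2)

lemma pvAdj_range {n : Int} {roads : List (Int × Int)}
    (hpre : ∀ p ∈ roads, 0 ≤ p.1 ∧ p.1 ≤ n ∧ 0 ≤ p.2 ∧ p.2 ≤ n)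
    {u v : Int} (h : pvAdj roads u v) : (0 ≤ u ∧ u ≤ n) ∧ (0 ≤ v ∧ v ≤ n) := by
  rcases h with h | h
  · have := hpre _ h; exact ⟨⟨this.1, this.2.1⟩, ⟨this.2.2.1, this.2.2.2⟩⟩
  · have := hpre _ h; exact ⟨⟨this.2.2.1, this.2.2.2⟩, ⟨this.1, this.2.1⟩⟩

-- ---------- B-side: the fold keeps comp.getD x x = minimum of x's component ----------

def pvInv (roads : List (Int × Int)) (comp : PySem.Dict Int Int) : Prop :=
  (∀ x : Int, pvConn roads x (comp.getD x x)) ∧ (∀ x y : Int, pvConn roads x y → comp.getD x x ≤ y)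

lemma pvRep_eq_of_conn {roads : List (Int × Int)} {comp : PySem.Dict Int Int} (h : pvInv roads comp)
    {x y : Int} (hxy : pvConn roads x y) : comp.getD x x = comp.getD y y := by
  have h1 : comp.getD x x ≤ comp.getD y y := h.2 x _ (hxy.trans (h.1 y))
  have h2 : comp.getD y y ≤ comp.getD x x := h.2 y _ ((pvConn_symm _ hxy).trans (h.1 x))
  omega

lemma pvRep_idem {roads : List (Int × Int)} {comp : PySem.Dict Int Int} (h : pvInv roads comp)
    (z : Int) : comp.getD (comp.getD z z) (comp.getD z z) = comp.getD z z := by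
  have := pvRep_eq_of_conn h (h.1 z)
  omega

lemma pvGet?_mk_mapf (l : List (Int × Int)) (f : Int → Int) (x : Int) :
    (PySem.Dict.mk (l.map fun q => (q.1, f q.2))).get? x = ((PySem.Dict.mk l).get? x).map f := by
  induction l with
  | nil => rfl
  | cons p t ih =>
    rw [List.map_cons, PySem.Dict.get?_mk_cons, PySem.Dict.get?_mk_cons]
    by_cases hx : p.1 == x
    · simp [hx]
    · simp only [hx, Bool.false_eq_true, if_false, ih]

lemma pvMapf_getD (d : PySem.Dict Int Int) (f : Int → Int) (x dflt : Int) :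
    (PySem.Dict.mk (d.items.map fun q => (q.1, f q.2))).getD x dflt
      = match d.get? x with
        | some v => f v
        | none => dflt := by
  rw [PySem.Dict.getD_eq_get?_getD, pvGet?_mk_mapf]
  cases d.get? x <;> simp

lemma pvUnion_rep (roads : List (Int × Int)) (comp : PySem.Dict Int Int) (h : pvInv roads comp)
    (a b x : Int) (hne : comp.getD a a ≠ comp.getD b b) :
    (pvUnion comp a b).getD x x =
      (if comp.getD x x = max (comp.getD a a) (comp.getD b b)
       then min (comp.getD a a) (comp.getD b b) else comp.getD x x) := by
  have hia := pvRep_idem h a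
  have hib := pvRep_idem h b
  unfold pvUnion
  simp only [hne, ne_eq, not_false_eq_true, if_true]
  rcases lt_or_gt_of_ne hne with hlt | hlt
  · have hmax : max (comp.getD a a) (comp.getD b b) = comp.getD b b := by omega
    have hmin : min (comp.getD a a) (comp.getD b b) = comp.getD a a := by omega
    simp only [if_pos hlt, hmax, hmin]
    rw [PySem.Dict.getD_insert,
        pvMapf_getD comp (fun v => if v = comp.getD b b then comp.getD a a else v) x x]
    by_cases hx : x = comp.getD b b
    · subst hx; simp [hib]
    · simp only [hx, if_false]
      rcases hget : comp.get? x with _ | v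
      · have : comp.getD x x = x := by simp [PySem.Dict.getD_eq_get?_getD, hget]
        simp [this, hx]
      · have : comp.getD x x = v := by simp [PySem.Dict.getD_eq_get?_getD, hget]
        simp [this]
  · have hmax : max (comp.getD a a) (comp.getD b b) = comp.getD a a := by omega
    have hmin : min (comp.getD a a) (comp.getD b b) = comp.getD b b := by omega
    have hnlt : ¬ (comp.getD a a < comp.getD b b) := by omega
    simp only [if_neg hnlt, hmax, hmin]
    rw [PySem.Dict.getD_insert,
        pvMapf_getD comp (fun v => if v = comp.getD a a then comp.getD b b else v) x x]
    by_cases hx : x = comp.getD a a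
    · subst hx; simp [hia]
    · simp only [hx, if_false]
      rcases hget : comp.get? x with _ | v
      · have : comp.getD x x = x := by simp [PySem.Dict.getD_eq_get?_getD, hget]
        simp [this, hx]
      · have : comp.getD x x = v := by simp [PySem.Dict.getD_eq_get?_getD, hget]
        simp [this]

lemma pvInv_union (roads : List (Int × Int)) (a b : Int) (comp : PySem.Dict Int Int)
    (h : pvInv roads comp) : pvInv (roads ++ [(a, b)]) (pvUnion comp a b) := by
  by_cases hne : comp.getD a a ≠ comp.getD b b
  case neg =>
    simp only [ne_eq, not_not] at hne
    have hab : pvConn roads a b := (h.1 a).trans (hne ▸ pvConn_symm _ (h.1 b))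
    have hcollapse : ∀ x y : Int, pvConn (roads ++ [(a, b)]) x y → pvConn roads x y := by
      intro x y hxy
      rcases (pvConn_snoc_iff roads a b x y).1 hxy with h1 | ⟨h1, h2⟩ | ⟨h1, h2⟩
      · exact h1
      · exact (h1.trans hab).trans h2
      · exact (h1.trans (pvConn_symm _ hab)).trans h2
    have hval : pvUnion comp a b = comp := by unfold pvUnion; simp [hne]
    rw [hval]
    exact ⟨fun x => pvConn_mono _ _ (h.1 x), fun x y hxy => h.2 x y (hcollapse x y hxy)⟩
  case pos =>
    set ra := comp.getD a a with hra
    set rb := comp.getD b b with hrb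
    set HI := max ra rb with hHI
    set LO := min ra rb with hLO
    have hrep : ∀ x : Int, (pvUnion comp a b).getD x x = if comp.getD x x = HI then LO else comp.getD x x :=
      fun x => pvUnion_rep roads comp h a b x hne
    have hconnHI : pvConn roads HI LO ∨ True := Or.inr trivial
    -- LO and HI are the two representatives of a and b (in some order)
    have hcases : (HI = ra ∧ LO = rb) ∨ (HI = rb ∧ LO = ra) := by
      rcases lt_or_gt_of_ne hne with hlt | hlt
      · right; constructor <;> omega
      · left; constructor <;> omega
    have hConn' : ∀ x y : Int, pvConn (roads ++ [(a, b)]) x y ↔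
        (pvConn roads x y ∨ (pvConn roads x a ∧ pvConn roads b y) ∨ (pvConn roads x b ∧ pvConn roads a y)) :=
      fun x y => pvConn_snoc_iff roads a b x y
    have haLO : pvConn (roads ++ [(a, b)]) a LO := by
      rcases hcases with ⟨_, hL⟩ | ⟨_, hL⟩
      · exact (hConn' a LO).2 (Or.inr (Or.inl ⟨pvConn_refl _ _, hL ▸ h.1 b⟩))
      · exact pvConn_mono _ _ (hL ▸ h.1 a)
    have hbLO : pvConn (roads ++ [(a, b)]) b LO :=
      ((pvConn_symm _ ((hConn' a b).2 (Or.inr (Or.inl ⟨pvConn_refl _ _, pvConn_refl _ _⟩))))).trans haLO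
    constructor
    · intro x
      rw [hrep x]
      by_cases hx : comp.getD x x = HI
      · simp only [hx, if_true]
        rcases hcases with ⟨hH, _⟩ | ⟨hH, _⟩
        · exact (pvConn_mono _ _ ((hx ▸ h.1 x : pvConn roads x HI).trans (hH ▸ pvConn_symm _ (h.1 a)))).trans haLO
        · exact (pvConn_mono _ _ ((hx ▸ h.1 x : pvConn roads x HI).trans (hH ▸ pvConn_symm _ (h.1 b)))).trans hbLO
      · simp only [hx, if_false]
        exact pvConn_mono _ _ (h.1 x)
    · intro x y hxy
      rw [hrep x]
      have hLOle : LO ≤ HI := by omega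
      rcases (hConn' x y).1 hxy with h1 | ⟨h1, h2⟩ | ⟨h1, h2⟩
      · have := h.2 x y h1
        by_cases hx : comp.getD x x = HI <;> simp only [hx, if_true, if_false] <;> omega
      · -- x ~ a, b ~ y : rep x = ra
        have hxa : comp.getD x x = ra := hra ▸ pvRep_eq_of_conn h h1
        have hby : rb ≤ y := h.2 b y h2
        rcases hcases with ⟨hH, hL⟩ | ⟨hH, hL⟩
        · -- HI = ra: rep x = HI, new rep = LO = rb ≤ y
          have : comp.getD x x = HI := by omega
          simp only [this, if_true]; omega
        · -- HI = rb, LO = ra = rep x ≠ HI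
          have hxaHI : comp.getD x x = HI ∨ ¬ (comp.getD x x = HI) := em _
          by_cases hx : comp.getD x x = HI
          · simp only [hx, if_true]; omega
          · simp only [hx, if_false]; omega
      · have hxb : comp.getD x x = rb := hrb ▸ pvRep_eq_of_conn h h1
        have hay : ra ≤ y := h.2 a y h2
        rcases hcases with ⟨hH, hL⟩ | ⟨hH, hL⟩
        · by_cases hx : comp.getD x x = HI
          · simp only [hx, if_true]; omega
          · simp only [hx, if_false]; omega
        · have : comp.getD x x = HI := by omega
          simp only [this, if_true]; omega

lemma pvInv_foldl (roads : List (Int × Int)) :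
    pvInv roads (roads.foldl (fun c p => pvUnion c p.1 p.2) PySem.Dict.empty) := by
  induction roads using List.reverseRecOn with
  | nil =>
    constructor
    · intro x; simp [PySem.Dict.getD_empty]; exact Relation.ReflTransGen.refl
    · intro x y hxy; have := pvConn_nil hxy; simp [PySem.Dict.getD_empty]; omega
  | append_singleton t e ih =>
    rw [List.foldl_append]
    exact pvInv_union t e.1 e.2 _ ih

lemma pvRep_eq_iff_conn {roads : List (Int × Int)} {comp : PySem.Dict Int Int} (h : pvInv roads comp)
    (j c : Int) : comp.getD j j = comp.getD c c ↔ pvConn roads j c := by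
  constructor
  · intro he
    exact (h.1 j).trans (he ▸ pvConn_symm _ (h.1 c))
  · exact pvRep_eq_of_conn h

-- ---------- A-side: visited arrays, graph building, BFS ----------

def pvVis (v : List Bool) (x : Int) : Prop := PySem.List.pyGetD v x false = true

lemma pvVis_set_iff (v : List Bool) (y x : Int) (hy0 : 0 ≤ y) (hyl : y < (v.length : Int))
    (hx0 : 0 ≤ x) : (pvVis (PySem.List.pySetD v y true) x ↔ (x = y ∨ pvVis v x)) := by
  rw [PySem.List.pySetD_of_nonneg _ _ hy0]
  unfold pvVis
  by_cases hxl : x < (v.length : Int)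
  · rw [PySem.List.pyGetD_eq_getElem _ false hx0 (by simpa using hxl),
        PySem.List.pyGetD_eq_getElem _ false hx0 hxl, List.getElem_set]
    by_cases he : x = y
    · subst he
      simp
    · have : y.toNat ≠ x.toNat := by omega
      simp [this, he]
  · have hnone : PySem.List.pyGet? (v.set y.toNat true) x = none := by
      rw [PySem.List.pyGet?_eq_none_iff]
      intro hr
      unfold PySem.Raise.InRange at hr
      simp at hr
      omega
    have hnone2 : PySem.List.pyGet? v x = none := by
      rw [PySem.List.pyGet?_eq_none_iff]
      intro hr
      unfold PySem.Raise.InRange at hr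
      omega
    rw [PySem.List.pyGetD_of_none _ _ _ hnone, PySem.List.pyGetD_of_none _ _ _ hnone2]
    constructor
    · intro h; cases h
    · rintro (h | h)
      · omega
      · cases h

lemma pvVis_replicate (k : Nat) (x : Int) : ¬ pvVis (List.replicate k false) x := by
  unfold pvVis
  intro h
  by_cases hr : PySem.Raise.InRange (List.replicate k false).length x
  · have := PySem.List.pyGetD_mem (List.replicate k false) false hr
    rw [h] at this
    simp at this
  · rw [PySem.List.pyGetD_of_none] at h
    · cases h
    · rw [PySem.List.pyGet?_eq_none_iff]; exact hr

lemma pvVis_false (v : List Bool) (x : Int) (h : PySem.List.pyGetD v x false = false) : ¬ pvVis v x := by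
  unfold pvVis; rw [h]; simp

-- the inner 'for neighbor in graph[node]' loop
lemma pvBfsFold_spec (n : Int) (nb : List Int) (hnb : ∀ y ∈ nb, 0 ≤ y ∧ y ≤ n) :
    ∀ (v : List Bool) (q : List Int), v.length = (n + 1).toNat →
    ∃ (v1 : List Bool) (ex : List Int),
      (nb.foldl (fun (s : List Bool × List Int) neighbor =>
          if PySem.List.pyGetD s.1 neighbor false = false then
            (PySem.List.pySetD s.1 neighbor true, s.2 ++ [neighbor])
          else s) (v, q)) = (v1, q ++ ex) ∧
      v1.length = v.length ∧
      (∀ y ∈ ex, y ∈ nb) ∧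
      v.countP (fun b => b = false) = v1.countP (fun b => b = false) + ex.length ∧
      (∀ x : Int, 0 ≤ x → (pvVis v1 x ↔ (pvVis v x ∨ x ∈ ex))) ∧
      (∀ y ∈ nb, pvVis v1 y) := by
  induction nb with
  | nil =>
    intro v q hlen
    exact ⟨v, [], by simp, rfl, by simp, by simp, fun x _ => by simp, by simp⟩
  | cons y t ih =>
    intro v q hlen
    have hy := hnb y (by simp)
    have hyl : y < (v.length : Int) := by
      rw [hlen]; omega
    have ht : ∀ z ∈ t, 0 ≤ z ∧ z ≤ n := fun z hz => hnb z (by simp [hz])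
    by_cases hvy : PySem.List.pyGetD v y false = false
    · -- neighbor unvisited: mark it and enqueue it
      set v0 := PySem.List.pySetD v y true with hv0
      have hlen0 : v0.length = (n + 1).toNat := by
        rw [hv0, PySem.List.length_pySetD, hlen]
      obtain ⟨v1, ex, heq, hl1, hsub, hcnt, hvis, hall⟩ := ih ht v0 (q ++ [y]) hlen0
      refine ⟨v1, y :: ex, ?_, ?_, ?_, ?_, ?_, ?_⟩
      · simp only [List.foldl_cons, hvy, if_true]
        rw [← hv0, heq]
        simp
      · rw [hl1, hv0, PySem.List.length_pySetD]
      · intro z hz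
        rcases List.mem_cons.mp hz with rfl | hz2
        · simp
        · simp [hsub _ hz2]
      · have hset : v0 = v.set y.toNat true := PySem.List.pySetD_of_nonneg v true (by omega)
        have hyNat : y.toNat < v.length := by omega
        have hgetf : v[y.toNat] = false := by
          have := PySem.List.pyGetD_eq_getElem v false (by omega : (0:Int) ≤ y) hyl
          rw [this] at hvy
          exact hvy
        have hmem : false ∈ v := by rw [← hgetf]; exact v.getElem_mem hyNat
        have : v0.countP (fun b => b = false) + 1 = v.countP (fun b => b = false) := by
          rw [hset, List.countP_set hyNat, hgetf]
          simp
          have hpos : 0 < v.countP (fun b => !b) := List.countP_pos_iff.mpr ⟨false, hmem, by simp⟩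
          omega
        rw [hcnt] at this
        simp only [List.length_cons]
        omega
      · intro x hx0
        rw [hvis x hx0, pvVis_set_iff v y x (by omega) hyl hx0]
        simp only [List.mem_cons]
        tauto
      · intro z hz
        rcases List.mem_cons.mp hz with rfl | hz
        · rw [hvis z (by omega)]
          left
          rw [pvVis_set_iff v z z (by omega) hyl (by omega)]
          exact Or.inl rfl
        · exact hall z hz
    · -- neighbor already visited: skip
      obtain ⟨v1, ex, heq, hl1, hsub, hcnt, hvis, hall⟩ := ih ht v q hlen
      refine ⟨v1, ex, ?_, hl1, fun z hz => by simp [hsub _ hz], hcnt, hvis, ?_⟩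
      · simp only [List.foldl_cons, hvy, if_false]
        exact heq
      · intro z hz
        rcases List.mem_cons.mp hz with rfl | hz
        · rw [hvis z (by omega)]
          left
          unfold pvVis
          rcases Bool.eq_false_or_eq_true (PySem.List.pyGetD v z false) with h | h
          · exact h
          · exact absurd h hvy
        · exact hall z hz

-- the 'while queue' loop: invariants and its final visited set
lemma pvBfsLoop_spec (n : Int) (roads : List (Int × Int)) (G : List (List Int))
    (hpre : ∀ p ∈ roads, 0 ≤ p.1 ∧ p.1 ≤ n ∧ 0 ≤ p.2 ∧ p.2 ≤ n)
    (hG : ∀ u v : Int, 0 ≤ u → u ≤ n → (v ∈ PySem.List.pyGetD G u [] ↔ pvAdj roads u v)) :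
    ∀ (fuel : Nat) (q : List Int) (v : List Bool),
      v.length = (n + 1).toNat →
      (∀ u ∈ q, (0 ≤ u ∧ u ≤ n) ∧ pvVis v u) →
      (∀ u x : Int, 0 ≤ u → u ≤ n → pvVis v u → u ∉ q → pvAdj roads u x → pvVis v x) →
      2 * v.countP (fun b => b = false) + q.length < fuel →
      (pvBfsLoop G fuel q v).length = v.length ∧
      (∀ x : Int, 0 ≤ x → pvVis v x → pvVis (pvBfsLoop G fuel q v) x) ∧
      (∀ x : Int, 0 ≤ x → pvVis (pvBfsLoop G fuel q v) x → pvVis v x ∨ ∃ u ∈ q, pvConn roads u x) ∧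
      (∀ u x : Int, 0 ≤ u → u ≤ n → pvVis (pvBfsLoop G fuel q v) u → pvAdj roads u x →
        pvVis (pvBfsLoop G fuel q v) x) := by
  intro fuel
  induction fuel with
  | zero => intro q v _ _ _ hfuel; omega
  | succ fuel ih =>
    intro q v hlen hq hclosed hfuel
    match hqe : q with
    | [] =>
      have hv : pvBfsLoop G (fuel + 1) [] v = v := by simp [pvBfsLoop]
      rw [hv]
      exact ⟨rfl, fun _ _ h => h, fun x _ h => Or.inl h,
        fun u x hu1 hun hvu hadj => hclosed u x hu1 hun hvu (by simp) hadj⟩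
    | node :: qt =>
      have hnode := hq node (by simp)
      have hnb : ∀ y ∈ PySem.List.pyGetD G node [], 0 ≤ y ∧ y ≤ n := by
        intro y hy
        have hadj := (hG node y hnode.1.1 hnode.1.2).1 hy
        exact (pvAdj_range hpre hadj).2
      obtain ⟨v1, ex, heq, hl1, hsub, hcnt, hvis, hall⟩ :=
        pvBfsFold_spec n (PySem.List.pyGetD G node []) hnb v qt hlen
      have hstep : pvBfsLoop G (fuel + 1) (node :: qt) v = pvBfsLoop G fuel (qt ++ ex) v1 := by
        simp only [pvBfsLoop]
        rw [heq]
      -- facts about elements of ex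
      have hexadj : ∀ y ∈ ex, pvAdj roads node y := by
        intro y hy
        exact (hG node y hnode.1.1 hnode.1.2).1 (hsub y hy)
      -- preconditions of the recursive call
      have hq1 : ∀ u ∈ qt ++ ex, (0 ≤ u ∧ u ≤ n) ∧ pvVis v1 u := by
        intro u hu
        rcases List.mem_append.mp hu with hu | hu
        · have h0 := hq u (by simp [hu])
          exact ⟨h0.1, ((hvis u (by omega)).2 (Or.inl h0.2))⟩
        · exact ⟨(pvAdj_range hpre (hexadj u hu)).2, ((hvis u (by have := (pvAdj_range hpre (hexadj u hu)).2; omega)).2 (Or.inr hu))⟩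
      have hclosed1 : ∀ u x : Int, 0 ≤ u → u ≤ n → pvVis v1 u → u ∉ qt ++ ex → pvAdj roads u x → pvVis v1 x := by
        intro u x hu1 hun hvu hnotin hadj
        have hx0 : (0 ≤ x ∧ x ≤ n) := (pvAdj_range hpre hadj).2
        rcases (hvis u (by omega)).1 hvu with hvu' | hex
        · by_cases hun' : u = node
          · subst hun'
            have hxnb : x ∈ PySem.List.pyGetD G u [] := (hG u x hu1 hun).2 hadj
            exact hall x hxnb
          · have hnotq : u ∉ node :: qt := by
              simp only [List.mem_cons]
              rintro (h | h)
              · exact hun' h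
              · exact hnotin (List.mem_append.mpr (Or.inl h))
            exact (hvis x (by omega)).2 (Or.inl (hclosed u x hu1 hun hvu' hnotq hadj))
        · exact absurd (List.mem_append.mpr (Or.inr hex)) hnotin
      have hfuel1 : 2 * v1.countP (fun b => b = false) + (qt ++ ex).length < fuel := by
        simp only [List.length_cons] at hfuel
        simp only [List.length_append]
        omega
      obtain ⟨ihl, ihmono, ihsound, ihclosed⟩ := ih (qt ++ ex) v1 (by omega) hq1 hclosed1 hfuel1
      rw [hstep]
      refine ⟨by omega, ?_, ?_, ihclosed⟩
      · intro x hx0 hvx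
        exact ihmono x hx0 ((hvis x hx0).2 (Or.inl hvx))
      · intro x hx0 hvx
        rcases ihsound x hx0 hvx with h1 | ⟨u, hu, hconn⟩
        · rcases (hvis x hx0).1 h1 with h2 | h2
          · exact Or.inl h2
          · exact Or.inr ⟨node, by simp, Relation.ReflTransGen.single (hexadj x h2)⟩
        · rcases List.mem_append.mp hu with hu | hu
          · exact Or.inr ⟨u, by simp [hu], hconn⟩
          · exact Or.inr ⟨node, by simp, (Relation.ReflTransGen.single (hexadj u hu)).trans hconn⟩

-- bfs(start, graph, visited): marks exactly the old set plus start's component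
lemma pvBfs_spec (n : Int) (roads : List (Int × Int)) (G : List (List Int))
    (hpre : ∀ p ∈ roads, 0 ≤ p.1 ∧ p.1 ≤ n ∧ 0 ≤ p.2 ∧ p.2 ≤ n)
    (hG : ∀ u v : Int, 0 ≤ u → u ≤ n → (v ∈ PySem.List.pyGetD G u [] ↔ pvAdj roads u v))
    (v : List Bool) (start : Int) (hs1 : 0 ≤ start) (hsn : start ≤ n)
    (hlen : v.length = (n + 1).toNat)
    (hclosed : ∀ u x : Int, 0 ≤ u → u ≤ n → pvVis v u → pvAdj roads u x → pvVis v x) :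
    (pvBfs start G v).length = v.length ∧
    (∀ x : Int, 0 ≤ x → (pvVis (pvBfs start G v) x ↔ (pvVis v x ∨ pvConn roads start x))) ∧
    (∀ u x : Int, 0 ≤ u → u ≤ n → pvVis (pvBfs start G v) u → pvAdj roads u x →
      pvVis (pvBfs start G v) x) := by
  have hsl : start < (v.length : Int) := by rw [hlen]; omega
  have hvis0 := fun (x : Int) (hx : 0 ≤ x) => pvVis_set_iff v start x (by omega) hsl hx
  set v0 := PySem.List.pySetD v start true with hv0
  have hlen0 : v0.length = v.length := PySem.List.length_pySetD v start true
  have hq0 : ∀ u ∈ [start], (0 ≤ u ∧ u ≤ n) ∧ pvVis v0 u := by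
    intro u hu
    rcases List.mem_singleton.mp hu with rfl
    exact ⟨⟨hs1, hsn⟩, (hvis0 u (by omega)).2 (Or.inl rfl)⟩
  have hclosed0 : ∀ u x : Int, 0 ≤ u → u ≤ n → pvVis v0 u → u ∉ [start] → pvAdj roads u x → pvVis v0 x := by
    intro u x hu1 hun hvu hnotin hadj
    have hu' : u ≠ start := by simpa using hnotin
    rcases (hvis0 u (by omega)).1 hvu with h | h
    · exact absurd h hu'
    · have hx := (pvAdj_range hpre hadj).2
      exact (hvis0 x (by omega)).2 (Or.inr (hclosed u x hu1 hun h hadj))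
  have hfuel : 2 * v0.countP (fun b => b = false) + ([start] : List Int).length < 2 * v.length + 2 := by
    have := List.countP_le_length (p := fun b => (b = false : Bool)) (l := v0)
    simp only [List.length_singleton]
    omega
  obtain ⟨hl, hmono, hsound, hclo⟩ :=
    pvBfsLoop_spec n roads G hpre hG (2 * v.length + 2) [start] v0 (by rw [hlen0, hlen]) hq0 hclosed0 hfuel
  have hbfs : pvBfs start G v = pvBfsLoop G (2 * v.length + 2) [start] v0 := by
    unfold pvBfs
    rw [← hv0]
  rw [hbfs]
  refine ⟨by omega, ?_, hclo⟩
  intro x hx0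
  constructor
  · intro hvx
    rcases hsound x hx0 hvx with h | ⟨u, hu, hconn⟩
    · rcases (hvis0 x hx0).1 h with rfl | h
      · exact Or.inr (pvConn_refl _ _)
      · exact Or.inl h
    · rcases List.mem_singleton.mp hu with rfl
      exact Or.inr hconn
  · rintro (hvx | hconn)
    · exact hmono x hx0 ((hvis0 x hx0).2 (Or.inr hvx))
    · -- walk the path: every visited node stays visited and closure extends it
      have : ∀ y : Int, pvConn roads start y →
          pvVis (pvBfsLoop G (2 * v.length + 2) [start] v0) y ∧ (0 ≤ y ∧ y ≤ n) := by
        intro y hy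
        induction hy with
        | refl =>
          exact ⟨hmono start (by omega) ((hvis0 start (by omega)).2 (Or.inl rfl)), hs1, hsn⟩
        | @tail c d hcd hstep ihp =>
          have hd := (pvAdj_range hpre hstep).2
          exact ⟨hclo c d ihp.2.1 ihp.2.2 ihp.1 hstep, hd⟩
      exact (this x hconn).1

lemma pvAppendAt_length (g : List (List Int)) (i x : Int) : (pvAppendAt g i x).length = g.length :=
  PySem.List.length_pySetD g i _

lemma pvAppendAt_get (g : List (List Int)) (i x j : Int) (hi0 : 0 ≤ i) (hil : i < (g.length : Int))
    (hj0 : 0 ≤ j) (hjl : j < (g.length : Int)) :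
    PySem.List.pyGetD (pvAppendAt g i x) j [] =
      if j = i then PySem.List.pyGetD g j [] ++ [x] else PySem.List.pyGetD g j [] := by
  unfold pvAppendAt
  rw [PySem.List.pySetD_of_nonneg _ _ hi0]
  rw [PySem.List.pyGetD_eq_getElem _ [] hj0 (by simpa using hjl),
      PySem.List.pyGetD_eq_getElem _ [] hj0 hjl, List.getElem_set,
      PySem.List.pyGetD_eq_getElem _ [] hi0 hil]
  by_cases he : j = i
  · subst he
    simp
  · have : i.toNat ≠ j.toNat := by omega
    simp [this, he]

lemma pvGetD_replicate (k : Nat) (u : Int) : PySem.List.pyGetD (List.replicate k ([] : List Int)) u [] = [] := by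
  by_cases hr : PySem.Raise.InRange (List.replicate k ([] : List Int)).length u
  · have := PySem.List.pyGetD_mem (List.replicate k ([] : List Int)) ([] : List Int) hr
    exact (List.mem_replicate.mp this).2
  · exact PySem.List.pyGetD_of_none _ _ _ ((PySem.List.pyGet?_eq_none_iff _ _).2 hr)

lemma pvGraph_spec (n : Int) (roads : List (Int × Int))
    (hpre : ∀ p ∈ roads, 0 ≤ p.1 ∧ p.1 ≤ n ∧ 0 ≤ p.2 ∧ p.2 ≤ n) :
    (roads.foldl (fun g p => pvAppendAt (pvAppendAt g p.1 p.2) p.2 p.1)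
        (List.replicate (n + 1).toNat ([] : List Int))).length = (n + 1).toNat ∧
    (∀ u v : Int, 0 ≤ u → u ≤ n →
      (v ∈ PySem.List.pyGetD (roads.foldl (fun g p => pvAppendAt (pvAppendAt g p.1 p.2) p.2 p.1)
        (List.replicate (n + 1).toNat ([] : List Int))) u [] ↔ pvAdj roads u v)) := by
  induction roads using List.reverseRecOn with
  | nil =>
    refine ⟨by simp, ?_⟩
    intro u v hu1 hun
    simp only [List.foldl_nil]
    rw [pvGetD_replicate]
    simp [pvAdj]
  | append_singleton t e iht =>
    have hpret : ∀ p ∈ t, 0 ≤ p.1 ∧ p.1 ≤ n ∧ 0 ≤ p.2 ∧ p.2 ≤ n :=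
      fun p hp => hpre p (by simp [hp])
    have hedge := hpre e (by simp)
    obtain ⟨ihl, ihmem⟩ := iht hpret
    rw [List.foldl_append]
    set G := t.foldl (fun g p => pvAppendAt (pvAppendAt g p.1 p.2) p.2 p.1)
        (List.replicate (n + 1).toNat ([] : List Int)) with hGdef
    have hlen : (G.length : Int) = n + 1 := by
      rw [ihl]
      omega
    constructor
    · simp only [List.foldl_cons, List.foldl_nil, pvAppendAt_length]
      exact ihl
    · intro u v hu1 hun
      simp only [List.foldl_cons, List.foldl_nil]
      have hG1l : ((pvAppendAt G e.1 e.2).length : Int) = n + 1 := by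
        rw [pvAppendAt_length]; exact hlen
      rw [pvAppendAt_get _ e.2 e.1 u (by omega) (by omega) (by omega) (by omega)]
      rw [pvAppendAt_get G e.1 e.2 u (by omega) (by omega) (by omega) (by omega)]
      have hadj : pvAdj (t ++ [e]) u v ↔ pvAdj t u v ∨ (u = e.1 ∧ v = e.2) ∨ (u = e.2 ∧ v = e.1) := by
        rcases e with ⟨a, b⟩
        exact pvAdj_snoc_iff t a b u v
      rw [hadj, ← ihmem u v hu1 hun]
      by_cases h1 : u = e.1 <;> by_cases h2 : u = e.2
      · subst h1
        simp [← h2]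
        try tauto
      · subst h1
        simp [h2]
        try tauto
      · subst h2
        simp [h1]
        try tauto
      · simp [h1, h2]
        try tauto

-- the outer 'for city in range(1, n+1)' loop of A, walked in lockstep with B's seen-set loop
lemma pvOuter_spec (n : Int) (roads : List (Int × Int)) (G : List (List Int)) (comp : PySem.Dict Int Int)
    (hpre : ∀ p ∈ roads, 0 ≤ p.1 ∧ p.1 ≤ n ∧ 0 ≤ p.2 ∧ p.2 ≤ n)
    (hG : ∀ u v : Int, 0 ≤ u → u ≤ n → (v ∈ PySem.List.pyGetD G u [] ↔ pvAdj roads u v))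
    (hinv : pvInv roads comp) :
    ∀ (k : Nat), (k : Int) ≤ n →
      ((PySem.List.pyRange 1 (1 + (k : Int)) 1).foldl
        (fun (s : List Int × List Bool) city =>
          if PySem.List.pyGetD s.2 city false = false then
            (s.1 ++ [city], pvBfs city G s.2)
          else s)
        ([], List.replicate (n + 1).toNat false)).2.length = (n + 1).toNat ∧
      (∀ u x : Int, 0 ≤ u → u ≤ n →
        pvVis ((PySem.List.pyRange 1 (1 + (k : Int)) 1).foldl
          (fun (s : List Int × List Bool) city =>
            if PySem.List.pyGetD s.2 city false = false then
              (s.1 ++ [city], pvBfs city G s.2)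
            else s)
          ([], List.replicate (n + 1).toNat false)).2 u → pvAdj roads u x →
        pvVis ((PySem.List.pyRange 1 (1 + (k : Int)) 1).foldl
          (fun (s : List Int × List Bool) city =>
            if PySem.List.pyGetD s.2 city false = false then
              (s.1 ++ [city], pvBfs city G s.2)
            else s)
          ([], List.replicate (n + 1).toNat false)).2 x) ∧
      (∀ x : Int, 0 ≤ x →
        (pvVis ((PySem.List.pyRange 1 (1 + (k : Int)) 1).foldl
          (fun (s : List Int × List Bool) city =>
            if PySem.List.pyGetD s.2 city false = false then
              (s.1 ++ [city], pvBfs city G s.2)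
            else s)
          ([], List.replicate (n + 1).toNat false)).2 x ↔
          ∃ j : Int, 1 ≤ j ∧ j < 1 + (k : Int) ∧ pvConn roads j x)) ∧
      ((PySem.List.pyRange 1 (1 + (k : Int)) 1).foldl
        (fun (s : List Int × List Bool) city =>
          if PySem.List.pyGetD s.2 city false = false then
            (s.1 ++ [city], pvBfs city G s.2)
          else s)
        ([], List.replicate (n + 1).toNat false)).1 =
        ((PySem.List.pyRange 1 (1 + (k : Int)) 1).foldl
          (fun (s : List Int × PySem.Set Int) c =>
            if PySem.Set.contains s.2 (comp.getD c c) = true then s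
            else (s.1 ++ [c], PySem.Set.add s.2 (comp.getD c c)))
          ([], PySem.Set.empty)).1 ∧
      (∀ r : Int,
        (((PySem.List.pyRange 1 (1 + (k : Int)) 1).foldl
          (fun (s : List Int × PySem.Set Int) c =>
            if PySem.Set.contains s.2 (comp.getD c c) = true then s
            else (s.1 ++ [c], PySem.Set.add s.2 (comp.getD c c)))
          ([], PySem.Set.empty)).2.contains r = true ↔
          ∃ j : Int, 1 ≤ j ∧ j < 1 + (k : Int) ∧ comp.getD j j = r)) := by
  intro k
  induction k with
  | zero =>
    intro _
    have hnil : PySem.List.pyRange 1 (1 + ((0 : Nat) : Int)) 1 = [] := by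
      apply PySem.List.pyRange_one_eq_nil
      norm_num
    rw [hnil]
    simp only [List.foldl_nil]
    refine ⟨by simp, ?_, ?_, by trivial, ?_⟩
    · intro u x _ _ hu _
      exact absurd hu (pvVis_replicate _ _)
    · intro x _
      constructor
      · intro hx; exact absurd hx (pvVis_replicate _ _)
      · rintro ⟨j, hj1, hj2, _⟩; omega
    · intro r
      constructor
      · intro h
        rw [PySem.Set.contains_iff] at h
        simp [PySem.Set.empty] at h
      · rintro ⟨j, hj1, hj2, _⟩; omega
  | succ k ihk =>
    intro hkn
    have hk' : (k : Int) ≤ n := by push_cast at hkn ⊢; omega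
    obtain ⟨ihlen, ihclo, ihvis, ihcomp, ihseen⟩ := ihk hk'
    have hsplit : PySem.List.pyRange 1 (1 + ((k + 1 : Nat) : Int)) 1 =
        PySem.List.pyRange 1 (1 + (k : Int)) 1 ++ [1 + (k : Int)] := by
      have : (1 : Int) + ((k + 1 : Nat) : Int) = (1 + (k : Int)) + 1 := by push_cast; ring
      rw [this]
      exact PySem.List.pyRange_one_succ_right (by omega)
    set city : Int := 1 + (k : Int) with hcity
    have hc1 : 1 ≤ city := by omega
    have hcn : city ≤ n := by push_cast at hkn; omega
    set s := (PySem.List.pyRange 1 (1 + (k : Int)) 1).foldl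
        (fun (s : List Int × List Bool) city =>
          if PySem.List.pyGetD s.2 city false = false then
            (s.1 ++ [city], pvBfs city G s.2)
          else s)
        ([], List.replicate (n + 1).toNat false) with hsdef
    set sB := (PySem.List.pyRange 1 (1 + (k : Int)) 1).foldl
        (fun (s : List Int × PySem.Set Int) c =>
          if PySem.Set.contains s.2 (comp.getD c c) = true then s
          else (s.1 ++ [c], PySem.Set.add s.2 (comp.getD c c)))
        ([], PySem.Set.empty) with hsBdef
    rw [hsplit, List.foldl_append, List.foldl_append]
    simp only [List.foldl_cons, List.foldl_nil]
    rw [← hsdef, ← hsBdef]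
    by_cases hvc : PySem.List.pyGetD s.2 city false = false
    · -- city starts a new component: A appends it and runs bfs, B appends it and records its representative
      rw [if_pos hvc]
      have hnotvis : ¬ pvVis s.2 city := pvVis_false _ _ hvc
      have hrB : sB.2.contains (comp.getD city city) = false := by
        rcases Bool.eq_false_or_eq_true (sB.2.contains (comp.getD city city)) with h | h
        · exfalso
          obtain ⟨j, hj1, hj2, hjr⟩ := (ihseen _).1 h
          exact hnotvis ((ihvis city (by omega)).2 ⟨j, hj1, hj2, (pvRep_eq_iff_conn hinv j city).1 hjr⟩)
        · exact h
      rw [if_neg (by rw [hrB]; simp)]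
      obtain ⟨hbl, hbvis, hbclo⟩ := pvBfs_spec n roads G hpre hG s.2 city (by omega) hcn ihlen
          (fun u x hu1 hun hvu hadj => ihclo u x hu1 hun hvu hadj)
      refine ⟨by rw [hbl, ihlen], hbclo, ?_, by rw [ihcomp], ?_⟩
      · intro x hx0
        rw [hbvis x hx0, ihvis x hx0]
        constructor
        · rintro (⟨j, hj1, hj2, hc⟩ | hc)
          · exact ⟨j, hj1, by push_cast; omega, hc⟩
          · exact ⟨city, hc1, by push_cast; omega, hc⟩
        · rintro ⟨j, hj1, hj2, hc⟩
          by_cases hjc : j = city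
          · exact Or.inr (hjc ▸ hc)
          · exact Or.inl ⟨j, hj1, by push_cast at hj2 ⊢; omega, hc⟩
      · intro r
        rw [PySem.Set.contains_iff, PySem.Set.mem_add]
        constructor
        · rintro (hmem | rfl)
          · obtain ⟨j, hj1, hj2, hjr⟩ := (ihseen r).1 (by rw [PySem.Set.contains_iff]; exact hmem)
            exact ⟨j, hj1, by push_cast; omega, hjr⟩
          · exact ⟨city, hc1, by push_cast; omega, rfl⟩
        · rintro ⟨j, hj1, hj2, hjr⟩
          by_cases hjc : j = city
          · right; rw [← hjr, hjc]
          · have hmem := (ihseen r).2 ⟨j, hj1, by push_cast at hj2 ⊢; omega, hjr⟩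
            rw [PySem.Set.contains_iff] at hmem
            exact Or.inl hmem
    · -- city was already visited: A skips it and so does B (its representative is already seen)
      rw [if_neg hvc]
      have hvisc : pvVis s.2 city := by
        unfold pvVis
        rcases Bool.eq_false_or_eq_true (PySem.List.pyGetD s.2 city false) with h | h
        · exact h
        · exact absurd h hvc
      obtain ⟨j0, hj01, hj02, hj0c⟩ := (ihvis city (by omega)).1 hvisc
      have hrB : sB.2.contains (comp.getD city city) = true :=
        (ihseen _).2 ⟨j0, hj01, hj02, pvRep_eq_of_conn hinv hj0c⟩
      rw [if_pos hrB]
      refine ⟨ihlen, ihclo, ?_, ihcomp, ?_⟩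
      · intro x hx0
        rw [ihvis x hx0]
        constructor
        · rintro ⟨j, hj1, hj2, hc⟩
          exact ⟨j, hj1, by push_cast; omega, hc⟩
        · rintro ⟨j, hj1, hj2, hc⟩
          by_cases hjc : j = city
          · exact ⟨j0, hj01, hj02, hj0c.trans (hjc ▸ hc)⟩
          · exact ⟨j, hj1, by push_cast at hj2 ⊢; omega, hc⟩
      · intro r
        rw [ihseen r]
        constructor
        · rintro ⟨j, hj1, hj2, hjr⟩
          exact ⟨j, hj1, by push_cast; omega, hjr⟩
        · rintro ⟨j, hj1, hj2, hjr⟩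
          by_cases hjc : j = city
          · exact ⟨j0, hj01, hj02, by rw [← hjr, hjc]; exact pvRep_eq_of_conn hinv hj0c⟩
          · exact ⟨j, hj1, by push_cast at hj2 ⊢; omega, hjr⟩

-- A's index-comprehension over components equals B's zip with the tail
lemma pvPairs_eq (l : List Int) :
    (PySem.List.pyRange 0 ((l.length : Int) - 1) 1).map
      (fun i => (PySem.List.pyGetD l i 0, PySem.List.pyGetD l (i + 1) 0)) = l.zip (l.drop 1) := by
  apply List.ext_getElem
  · simp only [List.length_map, PySem.List.length_pyRange_one, List.length_zip, List.length_drop]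
    omega
  · intro i h1 h2
    have hi : i < ((l.length : Int) - 1).toNat := by
      simpa [PySem.List.length_pyRange_one] using h1
    have hil : i < l.length := by omega
    have hi1l : i + 1 < l.length := by omega
    rw [List.getElem_map, PySem.List.getElem_pyRange_one 0 ((l.length : Int) - 1) i (by simpa [PySem.List.length_pyRange_one] using h1)]
    rw [List.getElem_zip]
    have e1 : PySem.List.pyGetD l ((0 : Int) + (i : Int)) 0 = l[i] := by
      rw [PySem.List.pyGetD_eq_getElem l 0 (by omega) (by push_cast; omega)]
      congr 1
      omega
    have e2 : PySem.List.pyGetD l ((0 : Int) + (i : Int) + 1) 0 = l[i + 1] := by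
      rw [PySem.List.pyGetD_eq_getElem l 0 (by omega) (by push_cast; omega)]
      congr 1
      omega
    rw [e1, e2]
    have h1i : (1 : Nat) + i = i + 1 := by omega
    simp [List.getElem_drop, h1i]

-- ===== VERDICT (by name: the statement is the Claim_ definition above) =====
set_option maxHeartbeats 1000000 in
theorem build_roads_spec : Claim_equal_build_roads := by
  intro n m roads hdom hpre
  unfold Spec_build_roads
  unfold Pre_build_roads at hpre
  by_cases hn : 0 ≤ n
  · obtain ⟨hGl, hGmem⟩ := pvGraph_spec n roads hpre
    have hinv := pvInv_foldl roads
    obtain ⟨hslen, hsclo, hsvis, hscomp, hseen⟩ :=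
      pvOuter_spec n roads _ (roads.foldl (fun c p => pvUnion c p.1 p.2) PySem.Dict.empty)
        hpre hGmem hinv n.toNat (by omega)
    have hb : (1 : Int) + ((n.toNat : Nat) : Int) = n + 1 := by omega
    rw [hb] at hscomp
    show build_roads n m roads = build_roads_alt n m roads
    simp only [build_roads, build_roads_alt]
    rw [hscomp, pvPairs_eq]
  · have hroads : roads = [] := by
      cases roads with
      | nil => rfl
      | cons p t =>
        exfalso
        have := hpre p (by simp)
        omega
    subst hroads
    show build_roads n m [] = build_roads_alt n m []
    simp only [build_roads, build_roads_alt]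
    rw [PySem.List.pyRange_one_eq_nil (by omega : n + 1 ≤ 1)]
    simp only [List.foldl_nil, List.filter_nil, List.length_nil, List.zip_nil_left,
      Nat.cast_zero, zero_sub]
    rw [PySem.List.pyRange_one_eq_nil (by norm_num : (-1 : Int) ≤ 0)]
    simp
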